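-- pv_equiv track=rewrite | github.com/zeeshan4002911/DSA-reloaded | 1.data-structure/8.deque/easy/lexicographically-largest-permutation.py | lexicographically_largest_permutation
-- ===== SOURCE A (Python) =====
-- from collections import deque
--
-- def lexicographically_largest_permutation(arr):
--     size = len(arr)
--     result_deque = deque()
--     if size >= 1:
--         result_deque.append(arr[0])
--
--     # Greedy Approach for maximization
--     for i in range(1, size):
--         # If element is greater than the front of element result then adding in the front
--         if arr[i] >= result_deque[0]:
--             result_deque.appendleft(arr[i])
--         # For smaller than rear element adding in the rear
--         else:
--             result_deque.append(arr[i])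
--
--     return list(result_deque)
-- ===== SOURCE B (Python) =====
-- def lexicographically_largest_permutation(arr):
--     # Stage 1: table of prefix maxima.
--     prefix_max = []
--     m = None
--     for x in arr:
--         if m is None or x > m:
--             m = x
--         prefix_max.append(m)
--     # Stage 2: an element is a "record" exactly when it equals the prefix max at its position.
--     records = [x for x, p in zip(arr, prefix_max) if x == p]
--     others = [x for x, p in zip(arr, prefix_max) if x != p]
--     # Stage 3: records are non-decreasing, so sorting them descending yields the deque's front part.
--     return sorted(records, reverse=True) + others
-- ===== Notes on version B (the rewrite author's own statement) =====
-- stated objective: alternative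
-- what changed: Replaces the online deque front-comparison with a staged offline algorithm: first build a prefix-maxima table, then partition elements into records (equal to their prefix max) and others by table lookup, and finally sort the records descending and concatenate the others; no deque and no front peeking.
import Mathlib
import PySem

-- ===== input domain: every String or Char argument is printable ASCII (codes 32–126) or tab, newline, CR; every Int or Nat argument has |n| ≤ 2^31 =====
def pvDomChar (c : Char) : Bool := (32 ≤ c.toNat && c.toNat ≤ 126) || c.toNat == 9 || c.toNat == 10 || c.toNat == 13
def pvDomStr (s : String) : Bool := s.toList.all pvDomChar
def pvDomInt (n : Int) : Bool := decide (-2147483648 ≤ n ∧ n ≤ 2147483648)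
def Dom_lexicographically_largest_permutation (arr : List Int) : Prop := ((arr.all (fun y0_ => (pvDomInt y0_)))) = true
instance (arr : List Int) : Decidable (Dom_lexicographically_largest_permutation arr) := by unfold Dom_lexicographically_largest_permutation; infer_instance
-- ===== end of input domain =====

-- B replaces A's online deque build with a staged algorithm: a prefix-maxima table, a
-- partition into records/others by table lookup, and a descending sort of the records.

-- ===== PORT A =====
-- loop body of A: arr[i] is `x`; compare with the deque front, push front or rear
def pvStepA (dq : List Int) (x : Int) : List Int :=
  if x ≥ PySem.List.pyGetD dq 0 0 then x :: dq else dq ++ [x]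

def lexicographically_largest_permutation (arr : List Int) : List Int :=
  (PySem.List.pyRange 1 (arr.length : Int) 1).foldl
    (fun dq i => pvStepA dq (PySem.List.pyGetD arr i 0))
    (if 1 ≤ (arr.length : Int) then [PySem.List.pyGetD arr 0 0] else [])

-- ===== PORT B =====
-- stage 1 of Source B: running state (prefix_max list, m : Option Int)
def pvPmStep (s : List Int × Option Int) (x : Int) : List Int × Option Int :=
  let m : Int := match s.2 with
    | none => x
    | some m => if x > m then x else m
  (s.1 ++ [m], some m)

def lexicographically_largest_permutation_alt (arr : List Int) : List Int :=
  let pm := (arr.foldl pvPmStep ([], none)).1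
  let records := ((arr.zip pm).filter (fun xp => xp.1 == xp.2)).map (fun xp => xp.1)
  let others := ((arr.zip pm).filter (fun xp => !(xp.1 == xp.2))).map (fun xp => xp.1)
  PySem.List.sorted records (fun x => x) true ++ others

-- ===== PRECONDITION & SPEC =====
def Spec_lexicographically_largest_permutation (arr : List Int) (out : List Int) : Prop := out = lexicographically_largest_permutation_alt arr
instance (arr : List Int) (out : List Int) : Decidable (Spec_lexicographically_largest_permutation arr out) := by unfold Spec_lexicographically_largest_permutation; infer_instance

-- ===== CLAIM (what is proved, stated in full; the proofs are below) =====
def Claim_equal_lexicographically_largest_permutation : Prop := ∀ (arr : List Int), Dom_lexicographically_largest_permutation arr → Spec_lexicographically_largest_permutation arr (lexicographically_largest_permutation arr)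

-- ===== LEMMAS AND PROOFS =====

-- spec-side recursions: the record elements (≥ all before) and the non-records, given the max m so far
def pvRecs : List Int → Int → List Int
  | [], _ => []
  | x :: rs, m => if m ≤ x then x :: pvRecs rs x else pvRecs rs m

def pvOths : List Int → Int → List Int
  | [], _ => []
  | x :: rs, m => if m ≤ x then pvOths rs x else x :: pvOths rs m

-- the deque front under the invariant dq = h.reverse ++ t (h ≠ []) is h's last element
theorem pvFront_eq (h t : List Int) (hh : h ≠ []) :
    PySem.List.pyGetD (h.reverse ++ t) 0 0 = h.getLast hh := by
  have hl : 0 < h.reverse.length := by simpa using List.length_pos_of_ne_nil hh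
  have hp : (0:Int) < ((h.reverse ++ t).length : Int) := by
    have h2 := hl; simp at h2 ⊢; omega
  simp only [PySem.List.pyGetD, PySem.List.pyGet?, PySem.List.pyIdx?]
  rw [if_pos (le_refl (0:Int)), if_pos hp]
  simp only [Option.bind_some, Int.toNat_zero]
  rw [List.getElem?_append_left hl]
  rw [List.getElem?_eq_getElem hl]
  simp [List.getElem_reverse, List.getLast_eq_getElem]

-- A's loop: the deque is (h ++ records).reverse ++ (t ++ others)
theorem pvKeyA (rest : List Int) :
    ∀ (h t : List Int) (m : Int) (hh : h ≠ []), h.getLast hh = m →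
      rest.foldl pvStepA (h.reverse ++ t) =
        (h ++ pvRecs rest m).reverse ++ (t ++ pvOths rest m) := by
  induction rest with
  | nil => intro h t m hh hm; simp [pvRecs, pvOths]
  | cons x rs ih =>
    intro h t m hh hm
    simp only [List.foldl_cons]
    by_cases hx : m ≤ x
    · have e1 : pvStepA (h.reverse ++ t) x = (h ++ [x]).reverse ++ t := by
        simp [pvStepA, pvFront_eq h t hh, hm, hx]
      rw [e1, ih (h ++ [x]) t x (by simp) (by simp)]
      simp [pvRecs, pvOths, hx]
    · have e1 : pvStepA (h.reverse ++ t) x = h.reverse ++ (t ++ [x]) := by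
        have : ¬ x ≥ m := hx
        simp [pvStepA, pvFront_eq h t hh, hm, this]
      rw [e1, ih h (t ++ [x]) m hh hm]
      simp [pvRecs, pvOths, hx]

-- spec-side prefix-maxima list
def pvPm : List Int → Int → List Int
  | [], _ => []
  | x :: rs, m => (if m < x then x else m) :: pvPm rs (if m < x then x else m)

-- stage 1 of B computes pvPm
theorem pvPmFold (rest : List Int) :
    ∀ (acc : List Int) (m : Int),
      rest.foldl pvPmStep (acc, some m) = (acc ++ pvPm rest m, some ((pvPm rest m).getLastD m)) := by
  induction rest with
  | nil => intro acc m; simp [pvPm]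
  | cons x rs ih =>
    intro acc m
    by_cases hx : m < x
    · have e : pvPmStep (acc, some m) x = (acc ++ [x], some x) := by
        simp [pvPmStep, hx]
      rw [List.foldl_cons, e, ih]
      simp only [pvPm, if_pos hx, List.getLastD_cons]
      simp
    · have e : pvPmStep (acc, some m) x = (acc ++ [m], some m) := by
        simp [pvPmStep, hx]
      rw [List.foldl_cons, e, ih]
      simp only [pvPm, if_neg hx, List.getLastD_cons]
      simp

-- stage 2 of B: the zip/filter partitions are pvRecs / pvOths
theorem pvZipFilter (rest : List Int) :
    ∀ m : Int,
      (((rest.zip (pvPm rest m)).filter (fun xp => xp.1 == xp.2)).map (fun xp => xp.1) = pvRecs rest m) ∧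
      (((rest.zip (pvPm rest m)).filter (fun xp => !(xp.1 == xp.2))).map (fun xp => xp.1) = pvOths rest m) := by
  induction rest with
  | nil => intro m; simp [pvPm, pvRecs, pvOths]
  | cons x rs ih =>
    intro m
    by_cases hx : m < x
    · have hq : x = (if m < x then x else m) := by simp [hx]
      constructor <;>
        simp [pvPm, pvRecs, pvOths, List.zip_cons_cons, ← hq,
          le_of_lt hx, (ih x).1, (ih x).2]
    · by_cases he : m ≤ x
      · have hxm : x = m := le_antisymm (by omega) he
        subst hxm
        constructor <;>
          simp [pvPm, pvRecs, pvOths, List.zip_cons_cons,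
            (ih x).1, (ih x).2]
      · have hne : ¬ (x = m) := by omega
        constructor <;>
          simp [pvPm, pvRecs, pvOths, List.zip_cons_cons, hx, he, hne,
            (ih m).1, (ih m).2]

-- m followed by its records is a non-decreasing chain
theorem pvChain (rest : List Int) : ∀ m : Int, (m :: pvRecs rest m).Pairwise (· ≤ ·) := by
  induction rest with
  | nil => intro m; simp [pvRecs]
  | cons x rs ih =>
    intro m
    by_cases hx : m ≤ x
    · simp only [pvRecs, if_pos hx]
      rw [List.pairwise_cons]
      refine ⟨?_, ih x⟩
      intro b hb
      rcases List.mem_cons.mp hb with rfl | hb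
      · exact hx
      · exact le_trans hx ((List.pairwise_cons.mp (ih x)).1 b hb)
    · simpa [pvRecs, hx] using ih m

-- Python's sorted(·, reverse=True) of a non-decreasing list is its reverse
theorem pvSortedRev (l : List Int) (hl : l.Pairwise (· ≤ ·)) :
    PySem.List.sorted l (fun x => x) true = l.reverse := by
  refine List.Perm.eq_of_pairwise (le := fun a b : Int => b ≤ a)
    (fun a b _ _ h1 h2 => by omega) ?_ ?_ ?_
  · exact PySem.List.sorted_pairwise_rev l (fun x => x)
  · exact (List.pairwise_reverse).mpr (by simpa using hl)
  · exact (PySem.List.sorted_perm l (fun x => x) true).trans (List.reverse_perm l).symm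

-- ===== VERDICT (by name: the statement is the Claim_ definition above) =====
theorem lexicographically_largest_permutation_spec : Claim_equal_lexicographically_largest_permutation := by
  intro arr _
  unfold Spec_lexicographically_largest_permutation
  cases arr with
  | nil => rfl
  | cons a rest =>
    unfold lexicographically_largest_permutation lexicographically_largest_permutation_alt
    rw [if_pos (by simp)]
    have h0 : PySem.List.pyGetD (a :: rest) 0 0 = a := by
      simp [PySem.List.pyGetD, PySem.List.pyGet?, PySem.List.pyIdx?]
    rw [h0, PySem.List.foldl_pyRange_pyGetD' (a :: rest) 0 pvStepA [a] (by norm_num)]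
    simp only [Int.toNat_one, List.drop_succ_cons, List.drop_zero]
    -- A side
    have hA := pvKeyA rest [a] [] a (by simp) (by simp)
    simp only [List.reverse_cons, List.reverse_nil, List.nil_append, List.append_nil] at hA
    rw [hA]
    -- B side: stage 1
    have hpm : ((a :: rest).foldl pvPmStep ([], none)).1 = a :: pvPm rest a := by
      simp only [List.foldl_cons, pvPmStep]
      rw [show ([] ++ [a] : List Int) = [a] by rfl, pvPmFold rest [a] a]
      simp
    rw [hpm]
    -- stage 2
    have hz1 := (pvZipFilter rest a).1
    have hz2 := (pvZipFilter rest a).2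
    simp only [List.zip_cons_cons, List.filter_cons, beq_self_eq_true, Bool.not_true,
      if_true, Bool.false_eq_true, if_false, List.map_cons]
    rw [hz1, hz2]
    -- stage 3
    rw [pvSortedRev (a :: pvRecs rest a) (pvChain rest a)]
    simp
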